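-- pv_equiv track=rewrite | github.com/radioxoma/testparser | testparser/__main__.py | min_diff
-- ===== SOURCE A (Python) =====
-- def short(text: list[str], count_stripped: bool = False) -> str:
--     """Shorten str for crib.
--
--     >>> short('Something wrong with compatibility regressions.'.split())
--     'Som-ng wrong with com-ty reg-s.'
--     >>> short('Something wrong with compatibility regressions.'.split(), True)
--     'Som4ng wrong with com8ty reg7s.'
--     """
--
--     def sh(word):
--         wl = len(word)
--         if wl > 7:
--             if count_stripped:
--                 return "{}{}{}".format(word[:3], wl - 5, word[-2:])
--             else:
--                 return "{}-{}".format(word[:3], word[-2:])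
--         else:
--             return word
--
--     return " ".join(map(sh, text))
--
-- def min_diff(strlist: list[str]) -> list[str]:
--     """Return maximum shortened but distinguishable string list.
--
--     Strings must be sorted already.
--     >>> min_diff(sorted(
--     ...     ['Clinical notes is the same way',
--     ...      'Clinical symptoms of lupus',
--     ...      'Clinical symptoms of lupus or something sophisticated']))
--     ['Cli-al notes is the same way', 'Cli-al sym-ms of lupus', 'Cli-al sym-ms of lupus or']
--     """
--     questions = list()
--     while len(strlist) > 1:
--         if strlist[-2] in strlist[-1]:
--             prelast = strlist[-2].split()
--             last = strlist.pop().split()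
--             prelast_word_plus = last[: len(prelast) + 1]  # + 1 different word
--             questions.append(short(prelast_word_plus))
--         else:
--             questions.append(short(strlist.pop().split()))
--     questions.append(short(strlist.pop().split()))
--     return questions[::-1]
-- ===== SOURCE B (Python) =====
-- def short(text, count_stripped=False):
--     def sh(word):
--         wl = len(word)
--         if wl > 7:
--             if count_stripped:
--                 return "{}{}{}".format(word[:3], wl - 5, word[-2:])
--             else:
--                 return "{}-{}".format(word[:3], word[-2:])
--         else:
--             return word
--
--     return " ".join(map(sh, text))
--
--
-- def min_diff(strlist):
--     """Forward single pass: compare each string with its predecessor;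
--     consumes strlist (pops it empty) like the original."""
--     questions = []
--     prev = None
--     while strlist:
--         cur = strlist.pop(0)
--         if prev is not None and prev in cur:
--             questions.append(short(cur.split()[: len(prev.split()) + 1]))
--         else:
--             questions.append(short(cur.split()))
--         prev = cur
--     return questions
-- ===== Notes on version B (the rewrite author's own statement) =====
-- stated objective: alternative
-- what changed: Replaces the backward pop-from-the-end loop with accumulate-then-reverse by a forward single pass that keeps the previous element and emits results in final order, no reversal.
import Mathlib
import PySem

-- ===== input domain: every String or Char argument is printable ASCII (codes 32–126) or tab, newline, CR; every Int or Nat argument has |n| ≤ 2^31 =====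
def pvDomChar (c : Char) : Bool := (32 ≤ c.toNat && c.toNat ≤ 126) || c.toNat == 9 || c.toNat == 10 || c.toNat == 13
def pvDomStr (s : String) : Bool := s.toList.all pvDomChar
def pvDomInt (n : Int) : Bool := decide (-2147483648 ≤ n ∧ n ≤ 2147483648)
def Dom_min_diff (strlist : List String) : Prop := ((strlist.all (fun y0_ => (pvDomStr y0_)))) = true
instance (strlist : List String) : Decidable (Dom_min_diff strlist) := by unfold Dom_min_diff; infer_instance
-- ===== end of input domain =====

-- B replaces A's backward pop-and-reverse loop by a forward pass keeping the previous element
-- (alternative decomposition, same cost). Both Pythons empty the input list in place;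
-- the equivalence proved here is about the RETURN value.

-- ===== PORT A =====
-- module helper short(text, count_stripped): shortens each word longer than 7 chars
def pvShortWord (count_stripped : Bool) (word : String) : String :=
  let wl : Int := (PySem.Str.len word : Int)
  if wl > 7 then
    if count_stripped then
      PySem.Str.slice word none (some 3) ++ PySem.Int.toStr (wl - 5) ++ PySem.Str.slice word (some (-2)) none
    else
      PySem.Str.slice word none (some 3) ++ "-" ++ PySem.Str.slice word (some (-2)) none
  else word

def pvShort (text : List String) (count_stripped : Bool) : String :=
  PySem.Str.join " " (text.map (pvShortWord count_stripped))

-- A's while loop pops from the END of strlist; the port carries the working list REVERSED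
-- (head = Python's strlist[-1], second = strlist[-2]) and the questions accumulator.
def min_diff_rec : List String → List String → List String
  | [], questions => questions            -- unreachable: Python raises IndexError on []
  | [last], questions =>                  -- final unconditional strlist.pop()
      questions ++ [pvShort (PySem.Str.split₀ last) false]
  | last :: prelast :: rest, questions =>
      if PySem.Str.isIn prelast last then
        let prelastW := PySem.Str.split₀ prelast
        let lastW := PySem.Str.split₀ last
        min_diff_rec (prelast :: rest)
          (questions ++ [pvShort (PySem.List.slice lastW none (some ((prelastW.length : Int) + 1))) false])
      else
        min_diff_rec (prelast :: rest)
          (questions ++ [pvShort (PySem.Str.split₀ last) false])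

def min_diff (strlist : List String) : List String :=
  (min_diff_rec strlist.reverse []).reverse   -- questions[::-1]

-- ===== PORT B =====
-- the per-element decision of Source B's loop body
def minDiffStep (prev cur : String) : String :=
  if PySem.Str.isIn prev cur then
    pvShort (PySem.List.slice (PySem.Str.split₀ cur) none (some (((PySem.Str.split₀ prev).length : Int) + 1))) false
  else
    pvShort (PySem.Str.split₀ cur) false

-- 'while strlist: cur = strlist.pop(0) …' with prev carried along; results in final order
def min_diff_alt_go : Option String → List String → List String
  | _, [] => []
  | prev, cur :: rest =>
      (match prev with
       | some p => minDiffStep p cur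
       | none => pvShort (PySem.Str.split₀ cur) false) :: min_diff_alt_go (some cur) rest

def min_diff_alt (strlist : List String) : List String :=
  min_diff_alt_go none strlist

-- ===== PRECONDITION & SPEC =====
-- Pre_ excludes only the empty list, on which Python A raises IndexError (pop from empty list).
def Pre_min_diff (strlist : List String) : Prop := strlist ≠ []
instance (strlist : List String) : Decidable (Pre_min_diff strlist) := by unfold Pre_min_diff; infer_instance
def pvWitness_min_diff : List String := ["ab cd", "ab cd ef"]

def Spec_min_diff (strlist : List String) (out : List String) : Prop := out = min_diff_alt strlist
instance (strlist : List String) (out : List String) : Decidable (Spec_min_diff strlist out) := by unfold Spec_min_diff; infer_instance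

-- ===== CLAIM (what is proved, stated in full; the proofs are below) =====
def Claim_equal_min_diff : Prop := ∀ (strlist : List String), Dom_min_diff strlist → Pre_min_diff strlist → Spec_min_diff strlist (min_diff strlist)

-- ===== LEMMAS AND PROOFS =====

-- B's loop, snoc on the right: the last element is compared against the one before it
lemma go_snoc (xs : List String) (p b a : String) :
    min_diff_alt_go (some p) ((xs ++ [b]) ++ [a])
      = min_diff_alt_go (some p) (xs ++ [b]) ++ [minDiffStep b a] := by
  induction xs generalizing p with
  | nil => rfl
  | cons x t ih => simp only [List.cons_append, min_diff_alt_go, ih, List.cons_append]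

lemma alt_snoc (b : String) (t : List String) (a : String) :
    min_diff_alt ((b :: t).reverse ++ [a])
      = min_diff_alt ((b :: t).reverse) ++ [minDiffStep b a] := by
  simp only [List.reverse_cons]
  cases h : t.reverse with
  | nil => rfl
  | cons x ys =>
      simp only [min_diff_alt, List.cons_append, min_diff_alt_go, go_snoc]

-- A's two-pops-ahead branch is exactly B's per-element decision
lemma rec_step (a b : String) (t acc : List String) :
    min_diff_rec (a :: b :: t) acc = min_diff_rec (b :: t) (acc ++ [minDiffStep b a]) := by
  simp only [min_diff_rec, minDiffStep]
  split_ifs <;> rfl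

-- main invariant: A's backward accumulation equals B's forward result, reversed
lemma rec_eq_alt (r : List String) (hr : r ≠ []) (acc : List String) :
    min_diff_rec r acc = acc ++ (min_diff_alt r.reverse).reverse := by
  induction r generalizing acc with
  | nil => exact absurd rfl hr
  | cons a r ih =>
      cases r with
      | nil => simp [min_diff_rec, min_diff_alt, min_diff_alt_go]
      | cons b t =>
          rw [rec_step, ih (by simp) (acc ++ [minDiffStep b a])]
          have : (a :: b :: t).reverse = (b :: t).reverse ++ [a] := by simp
          rw [this, alt_snoc]
          simp

-- ===== VERDICT (by name: the statement is the Claim_ definition above) =====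
theorem min_diff_spec : Claim_equal_min_diff := by
  intro strlist _ hpre
  unfold Spec_min_diff min_diff
  rw [rec_eq_alt strlist.reverse (by simpa using hpre) []]
  simp
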